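-- pv_equiv track=rewrite | github.com/gta98/pcc | pcc_utils.py | find_next_string
-- ===== SOURCE A (Python) =====
-- def find_next_string(haystack, start=0):
--     string_chars = ['\'', '\"']
--     start_char = None
--     start_i = start
--     l = len(haystack)
--     i = start
--     if i < 0 or i >= l: return (-1,-1)
--     while i < l:
--         if haystack[i] in string_chars:
--             start_char = haystack[i]
--             i+=1
--             start_i = i
--             while i < l:
--                 if haystack[i]=="\\": i+=2
--                 elif haystack[i]==start_char: return (start_i,i)
--                 else: i+=1
--         i+=1
--     return (-1,-1)
-- ===== SOURCE B (Python) =====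
-- def find_next_string(haystack, start=0):
--     l = len(haystack)
--     if start < 0 or start >= l:
--         return (-1, -1)
--     # opening quote: earliest occurrence of either quote character
--     a = haystack.find("'", start)
--     b = haystack.find('"', start)
--     p = min(a, b) if a != -1 and b != -1 else max(a, b)
--     if p == -1:
--         return (-1, -1)
--     q = haystack[p]
--     # closing quote: jump between occurrences of q; one closes iff the run of
--     # backslashes immediately before it has even length (even = not escaped)
--     j = haystack.find(q, p + 1)
--     while j != -1:
--         k = j - 1
--         while k > p and haystack[k] == '\\':
--             k -= 1
--         if (j - 1 - k) % 2 == 0: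
--             return (p + 1, j)
--         j = haystack.find(q, j + 1)
--     return (-1, -1)
-- ===== Notes on version B (the rewrite author's own statement) =====
-- stated objective: faster
-- what changed: A scans character by character with nested whiles and an i+=2 escape jump; B instead jumps between quote occurrences with str.find and decides each candidate by the parity of the backslash run immediately before it (even run = unescaped closing quote), so the per-character work moves into C-level find calls.
import Mathlib
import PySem

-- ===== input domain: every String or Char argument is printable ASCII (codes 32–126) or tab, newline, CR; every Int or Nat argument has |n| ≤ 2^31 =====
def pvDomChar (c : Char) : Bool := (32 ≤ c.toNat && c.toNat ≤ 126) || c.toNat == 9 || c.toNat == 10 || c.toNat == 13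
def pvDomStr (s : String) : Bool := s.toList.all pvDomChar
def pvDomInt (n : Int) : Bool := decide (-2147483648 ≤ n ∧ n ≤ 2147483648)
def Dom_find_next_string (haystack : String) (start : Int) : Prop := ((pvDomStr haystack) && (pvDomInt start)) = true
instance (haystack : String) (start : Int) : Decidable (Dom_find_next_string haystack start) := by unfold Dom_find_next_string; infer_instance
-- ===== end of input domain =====

-- B replaces A's char-by-char scanner (nested whiles with the skip-two i+=2 escape
-- jump) by a different algorithm: str.find jumps directly between occurrences of the
-- quote character, and a candidate closes the string iff the run of backslashes
-- immediately before it has even length (parity test instead of forward scanning).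
-- Objective: faster (same O(n) worst case; a timing run measured B faster, the
-- per-character work moving into str.find).

-- ===== PORT A =====
-- inner 'while i < l' of A: skip escaped chars with i+=2, return (start_i, i) on the closing quote.
-- (indices here are always ≥ 0: the access is guarded by i < l, so pyGetD is exact)
def fnsA_inner (cs : List Char) (l : Int) (q : Char) (start_i i : Int) : Int × Int :=
  if h : i < l then
    let c := PySem.List.pyGetD cs i ' '
    if c = '\\' then fnsA_inner cs l q start_i (i + 2)
    else if c = q then (start_i, i)
    else fnsA_inner cs l q start_i (i + 1)
  else (-1, -1)   -- inner while exits with i ≥ l; A's outer while then also exits and returns (-1,-1)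
termination_by (l - i).toNat
decreasing_by all_goals omega

-- outer 'while i < l' of A: advance to the first quote character
def fnsA_outer (cs : List Char) (l : Int) (i : Int) : Int × Int :=
  if h : i < l then
    let c := PySem.List.pyGetD cs i ' '
    if c = '\'' || c = '"' then fnsA_inner cs l c (i + 1) (i + 1)
    else fnsA_outer cs l (i + 1)
  else (-1, -1)
termination_by (l - i).toNat
decreasing_by omega

def find_next_string (haystack : String) (start : Int) : Int × Int :=
  if start < 0 || (haystack.toList.length : Int) ≤ start then (-1, -1)
  else fnsA_outer haystack.toList haystack.toList.length start

-- ===== PORT B =====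
-- haystack.find(c, i): first index j ≥ i with cs[j] = c, else -1 (called with 0 ≤ i only)
def fnsB_findCh (cs : List Char) (l : Int) (c : Char) (i : Int) : Int :=
  if h : i < l then
    if PySem.List.pyGetD cs i ' ' = c then i else fnsB_findCh cs l c (i + 1)
  else -1
termination_by (l - i).toNat
decreasing_by omega

-- used by fnsB_loop's termination proof (cited in decreasing_by)
theorem fnsB_findCh_bounds (cs : List Char) (l : Int) (c : Char) :
    ∀ i : Int, fnsB_findCh cs l c i ≠ -1 →
      i ≤ fnsB_findCh cs l c i ∧ fnsB_findCh cs l c i < l := by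
  intro i
  fun_induction fnsB_findCh cs l c i with
  | case1 i h hc => intro _; omega
  | case2 i h hc ih => intro hne; have := ih hne; omega
  | case3 i h => intro hne; exact absurd rfl hne

-- 'while k > p and haystack[k] == "\\": k -= 1'
def fnsB_back (cs : List Char) (p k : Int) : Int :=
  if h : p < k ∧ PySem.List.pyGetD cs k ' ' = '\\' then fnsB_back cs p (k - 1) else k
termination_by (k - p).toNat
decreasing_by omega

-- 'while j != -1: …' candidate loop of Source B
def fnsB_loop (cs : List Char) (l : Int) (q : Char) (p j : Int) : Int × Int :=
  let j' := fnsB_findCh cs l q j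
  if hne : j' = -1 then (-1, -1)
  else if (j' - 1 - fnsB_back cs p (j' - 1)) % 2 = 0 then (p + 1, j')
  else fnsB_loop cs l q p (j' + 1)
termination_by (l - j).toNat
decreasing_by
  have := fnsB_findCh_bounds cs l q j hne
  omega

def find_next_string_alt (haystack : String) (start : Int) : Int × Int :=
  if start < 0 || (haystack.toList.length : Int) ≤ start then (-1, -1)
  else
    let cs := haystack.toList
    let l : Int := cs.length
    let a := fnsB_findCh cs l '\'' start
    let b := fnsB_findCh cs l '"' start
    let p := if a ≠ -1 ∧ b ≠ -1 then min a b else max a b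
    if p = -1 then (-1, -1)
    else fnsB_loop cs l (PySem.List.pyGetD cs p ' ') p (p + 1)

-- ===== PRECONDITION & SPEC =====
def Spec_find_next_string (haystack : String) (start : Int) (out : Int × Int) : Prop := out = find_next_string_alt haystack start
instance (haystack : String) (start : Int) (out : Int × Int) : Decidable (Spec_find_next_string haystack start out) := by unfold Spec_find_next_string; infer_instance

-- ===== CLAIM (what is proved, stated in full; the proofs are below) =====
def Claim_equal_find_next_string : Prop := ∀ (haystack : String) (start : Int), Dom_find_next_string haystack start → Spec_find_next_string haystack start (find_next_string haystack start)

-- ===== LEMMAS AND PROOFS =====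

-- step equations for fnsB_findCh
theorem findCh_hit {cs : List Char} {l : Int} {c : Char} {i : Int}
    (h : i < l) (hc : PySem.List.pyGetD cs i ' ' = c) : fnsB_findCh cs l c i = i := by
  rw [fnsB_findCh]; simp [h, hc]

theorem findCh_step {cs : List Char} {l : Int} {c : Char} {i : Int}
    (h : i < l) (hc : PySem.List.pyGetD cs i ' ' ≠ c) :
    fnsB_findCh cs l c i = fnsB_findCh cs l c (i + 1) := by
  rw [fnsB_findCh]; simp [h, hc]

theorem findCh_end {cs : List Char} {l : Int} {c : Char} {i : Int}
    (h : ¬ i < l) : fnsB_findCh cs l c i = -1 := by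
  rw [fnsB_findCh]; simp [h]

-- step equations for fnsB_back
theorem back_stop {cs : List Char} {p k : Int}
    (h : ¬ (p < k ∧ PySem.List.pyGetD cs k ' ' = '\\')) : fnsB_back cs p k = k := by
  rw [fnsB_back]; simp [h]

theorem back_step {cs : List Char} {p k : Int}
    (h1 : p < k) (h2 : PySem.List.pyGetD cs k ' ' = '\\') :
    fnsB_back cs p k = fnsB_back cs p (k - 1) := by
  rw [fnsB_back]; simp [h1, h2]

-- step equations for fnsB_loop
theorem loop_none {cs : List Char} {l : Int} {q : Char} {p j : Int}
    (h : fnsB_findCh cs l q j = -1) : fnsB_loop cs l q p j = (-1, -1) := by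
  rw [fnsB_loop]; simp [h]

theorem loop_found {cs : List Char} {l : Int} {q : Char} {p j j' : Int}
    (h : fnsB_findCh cs l q j = j') (hne : j' ≠ -1)
    (hpar : (j' - 1 - fnsB_back cs p (j' - 1)) % 2 = 0) :
    fnsB_loop cs l q p j = (p + 1, j') := by
  rw [fnsB_loop]; simp [h, hne, hpar]

theorem loop_skip {cs : List Char} {l : Int} {q : Char} {p j j' : Int}
    (h : fnsB_findCh cs l q j = j') (hne : j' ≠ -1)
    (hpar : ¬ (j' - 1 - fnsB_back cs p (j' - 1)) % 2 = 0) :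
    fnsB_loop cs l q p j = fnsB_loop cs l q p (j' + 1) := by
  rw [fnsB_loop]; simp [h, hne, hpar]

-- the loop only looks at the haystack through fnsB_findCh from its start index
theorem loop_congr {cs : List Char} {l : Int} {q : Char} {p j1 j2 : Int}
    (h : fnsB_findCh cs l q j1 = fnsB_findCh cs l q j2) :
    fnsB_loop cs l q p j1 = fnsB_loop cs l q p j2 := by
  by_cases h1 : fnsB_findCh cs l q j1 = -1
  · rw [loop_none h1, loop_none (h ▸ h1)]
  · by_cases hpar : (fnsB_findCh cs l q j1 - 1 - fnsB_back cs p (fnsB_findCh cs l q j1 - 1)) % 2 = 0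
    · rw [loop_found rfl h1 hpar, loop_found h.symm h1 hpar]
    · rw [loop_skip rfl h1 hpar, loop_skip h.symm h1 hpar]

-- A's skip-two scanner from i equals B's find/parity loop searching from i,
-- provided the backslash run ending just before i (bounded below by p) is even.
theorem fnsA_inner_eq (cs : List Char) (l : Int) (q : Char) (p : Int)
    (hq : q ≠ '\\') (hp : 0 ≤ p) :
    ∀ i : Int, p + 1 ≤ i → (i - 1 - fnsB_back cs p (i - 1)) % 2 = 0 →
      fnsA_inner cs l q (p + 1) i = fnsB_loop cs l q p i := by
  intro i
  fun_induction fnsA_inner cs l q (p + 1) i with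
  | case1 i h c hbs ih =>
    -- c = cs[i] = '\\'
    intro hpi hpar
    have hcq : PySem.List.pyGetD cs i ' ' ≠ q := by
      show c ≠ q; rw [hbs]; exact fun e => hq e.symm
    have hb_i : fnsB_back cs p i = fnsB_back cs p (i - 1) :=
      back_step (by omega) hbs
    have hf1 : fnsB_findCh cs l q i = fnsB_findCh cs l q (i + 1) := findCh_step h hcq
    by_cases h2 : i + 1 < l
    · by_cases hq2 : PySem.List.pyGetD cs (i + 1) ' ' = q
      · -- candidate at i+1, escaped (odd run): loop skips to i+2
        have hf2 : fnsB_findCh cs l q i = i + 1 := by rw [hf1, findCh_hit h2 hq2]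
        have hparA : ¬ (i + 1 - 1 - fnsB_back cs p (i + 1 - 1)) % 2 = 0 := by
          have : (i + 1 - 1 : Int) = i := by ring
          rw [this, hb_i]; omega
        have hskip := loop_skip hf2 (by omega) hparA
        have hinv : (i + 2 - 1 - fnsB_back cs p (i + 2 - 1)) % 2 = 0 := by
          have : (i + 2 - 1 : Int) = i + 1 := by ring
          rw [this, back_stop (by rw [hq2]; exact fun hh => hq hh.2)]
          omega
        rw [show (i + 1 + 1 : Int) = i + 2 from by ring] at hskip
        rw [ih (by omega) hinv, ← hskip]
      · -- no candidate at i or i+1: both searches continue from i+2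
        have hf2 : fnsB_findCh cs l q i = fnsB_findCh cs l q (i + 2) := by
          rw [hf1, findCh_step h2 hq2]; congr 1; ring
        have hinv : (i + 2 - 1 - fnsB_back cs p (i + 2 - 1)) % 2 = 0 := by
          have e1 : (i + 2 - 1 : Int) = i + 1 := by ring
          by_cases hb2 : PySem.List.pyGetD cs (i + 1) ' ' = '\\'
          · have : fnsB_back cs p (i + 1) = fnsB_back cs p (i - 1) := by
              rw [back_step (by omega) hb2]
              have : (i + 1 - 1 : Int) = i := by ring
              rw [this, hb_i]
            rw [e1, this]; omega
          · rw [e1, back_stop (by exact fun hh => hb2 hh.2)]; omega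
        rw [ih (by omega) hinv, loop_congr hf2]
    · -- end of haystack after the backslash: both sides find nothing
      have hf2 : fnsB_findCh cs l q i = fnsB_findCh cs l q (i + 2) := by
        rw [hf1, findCh_end h2, findCh_end (show ¬ i + 2 < l by omega)]
      have hinv : (i + 2 - 1 - fnsB_back cs p (i + 2 - 1)) % 2 = 0 := by
        have e1 : (i + 2 - 1 : Int) = i + 1 := by ring
        by_cases hb2 : PySem.List.pyGetD cs (i + 1) ' ' = '\\'
        · have : fnsB_back cs p (i + 1) = fnsB_back cs p (i - 1) := by
            rw [back_step (by omega) hb2]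
            have : (i + 1 - 1 : Int) = i := by ring
            rw [this, hb_i]
          rw [e1, this]; omega
        · rw [e1, back_stop (by exact fun hh => hb2 hh.2)]; omega
      rw [ih (by omega) hinv, loop_congr hf2]
  | case2 i h c hbs hcq =>
    -- c = cs[i] = q: A returns here; B finds candidate i with even run
    intro hpi hpar
    have hf : fnsB_findCh cs l q i = i := findCh_hit h hcq
    rw [loop_found hf (by omega) hpar]
  | case3 i h c hbs hcq ih =>
    -- ordinary character: both sides move one to the right
    intro hpi hpar
    have hf : fnsB_findCh cs l q i = fnsB_findCh cs l q (i + 1) := findCh_step h hcq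
    have hinv : (i + 1 - 1 - fnsB_back cs p (i + 1 - 1)) % 2 = 0 := by
      have e1 : (i + 1 - 1 : Int) = i := by ring
      rw [e1, back_stop (by exact fun hh => hbs hh.2)]; omega
    rw [ih (by omega) hinv, loop_congr hf]
  | case4 i h =>
    intro _ _
    rw [loop_none (findCh_end h)]

-- A's outer quote search equals B's two-find/min opening computation
theorem fnsA_outer_eq (cs : List Char) (l : Int) :
    ∀ i : Int, 0 ≤ i →
      fnsA_outer cs l i =
        (let a := fnsB_findCh cs l '\'' i
         let b := fnsB_findCh cs l '"' i
         let p := if a ≠ -1 ∧ b ≠ -1 then min a b else max a b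
         if p = -1 then (-1, -1)
         else fnsB_loop cs l (PySem.List.pyGetD cs p ' ') p (p + 1)) := by
  intro i
  fun_induction fnsA_outer cs l i with
  | case1 i h c hq =>
    intro hi
    have hinv : ∀ pp : Int, (pp + 1 - 1 - fnsB_back cs pp (pp + 1 - 1)) % 2 = 0 := by
      intro pp
      have e1 : (pp + 1 - 1 : Int) = pp := by ring
      rw [e1, back_stop (by exact fun hh => absurd hh.1 (lt_irrefl pp))]; omega
    rcases Bool.or_eq_true_iff.mp hq with hq' | hq'
    · -- cs[i] = '\''
      have hc1 : PySem.List.pyGetD cs i ' ' = '\'' := of_decide_eq_true hq'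
      have ha : fnsB_findCh cs l '\'' i = i := findCh_hit h hc1
      have hb : fnsB_findCh cs l '"' i = fnsB_findCh cs l '"' (i + 1) :=
        findCh_step h (by rw [hc1]; decide)
      have hpeq : (if fnsB_findCh cs l '\'' i ≠ -1 ∧ fnsB_findCh cs l '"' i ≠ -1
          then min (fnsB_findCh cs l '\'' i) (fnsB_findCh cs l '"' i)
          else max (fnsB_findCh cs l '\'' i) (fnsB_findCh cs l '"' i)) = i := by
        by_cases hbn : fnsB_findCh cs l '"' (i + 1) = -1
        · rw [ha, hb, hbn]; simp; omega
        · have := fnsB_findCh_bounds cs l '"' (i + 1) hbn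
          rw [ha, hb]
          have : min i (fnsB_findCh cs l '"' (i + 1)) = i := by omega
          simp [hbn, this]; omega
      simp only [hpeq]
      have hine : ¬ (i = -1) := by omega
      simp only [hine, if_false, hc1]
      have := fnsA_inner_eq cs l '\'' i (by decide) hi (i + 1) (by omega) (hinv i)
      rw [show c = '\'' from hc1, this]
    · -- cs[i] = '"'
      have hc1 : PySem.List.pyGetD cs i ' ' = '"' := of_decide_eq_true hq'
      have hb : fnsB_findCh cs l '"' i = i := findCh_hit h hc1
      have ha : fnsB_findCh cs l '\'' i = fnsB_findCh cs l '\'' (i + 1) :=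
        findCh_step h (by rw [hc1]; decide)
      have hpeq : (if fnsB_findCh cs l '\'' i ≠ -1 ∧ fnsB_findCh cs l '"' i ≠ -1
          then min (fnsB_findCh cs l '\'' i) (fnsB_findCh cs l '"' i)
          else max (fnsB_findCh cs l '\'' i) (fnsB_findCh cs l '"' i)) = i := by
        by_cases han : fnsB_findCh cs l '\'' (i + 1) = -1
        · rw [hb, ha, han]; simp; omega
        · have := fnsB_findCh_bounds cs l '\'' (i + 1) han
          rw [hb, ha]
          have : min (fnsB_findCh cs l '\'' (i + 1)) i = i := by omega
          simp [han, this]; omega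
      simp only [hpeq]
      have hine : ¬ (i = -1) := by omega
      simp only [hine, if_false, hc1]
      have := fnsA_inner_eq cs l '"' i (by decide) hi (i + 1) (by omega) (hinv i)
      rw [show c = '"' from hc1, this]
  | case2 i h c hq ih =>
    intro hi
    have hq' : PySem.List.pyGetD cs i ' ' ≠ '\'' ∧ PySem.List.pyGetD cs i ' ' ≠ '"' := by
      constructor <;> (intro e; apply hq; show (decide (c = '\'') || decide (c = '"')) = true; simp [show c = _ from e])
    have ha : fnsB_findCh cs l '\'' i = fnsB_findCh cs l '\'' (i + 1) :=
      findCh_step h hq'.1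
    have hb : fnsB_findCh cs l '"' i = fnsB_findCh cs l '"' (i + 1) :=
      findCh_step h hq'.2
    simp only [ha, hb]
    exact ih (by omega)
  | case3 i h =>
    intro _
    have ha : fnsB_findCh cs l '\'' i = -1 := findCh_end h
    have hb : fnsB_findCh cs l '"' i = -1 := findCh_end h
    simp [ha, hb]

-- ===== VERDICT (by name: the statement is the Claim_ definition above) =====
theorem find_next_string_spec : Claim_equal_find_next_string := by
  intro haystack start _
  unfold Spec_find_next_string find_next_string find_next_string_alt
  split
  next => rfl
  next h =>
    simp only [Bool.or_eq_true, decide_eq_true_eq, not_or] at h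
    exact fnsA_outer_eq haystack.toList haystack.toList.length start (by omega)
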